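-- pv_equiv track=rewrite | github.com/HavilandTuff/guillotine-plus | guillotine_plus/gplus_lib/calculator.py | calculate_tile_regions
-- ===== SOURCE A (Python) =====
-- from typing import List, Tuple, Dict
--
-- def calculate_tile_regions(
--     image_width: int,
--     image_height: int,
--     tile_width: int,
--     tile_height: int,
--     divider_width: int = 0
-- ) -> Tuple[List[Tuple[int, int, int, int]], Dict[str, int]]:
--     """
--     Calculate tile regions for slicing an image.
--
--     Args:
--         image_width: Width of the source image in pixels
--         image_height: Height of the source image in pixels
--         tile_width: Width of each tile in pixels
--         tile_height: Height of each tile in pixels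
--         divider_width: Width of divider lines between tiles (discarded during cut)
--
--     Returns:
--         Tuple containing:
--         - List of tile regions as (x, y, width, height) tuples
--         - Metadata dict with 'rows', 'cols', 'total_tiles'
--
--     Example:
--         >>> tiles, meta = calculate_tile_regions(1000, 1000, 100, 100, 0)
--         >>> len(tiles)
--         100
--         >>> meta
--         {'rows': 10, 'cols': 10, 'total_tiles': 100}
--     """
--     tiles = []
--
--     # Edge case: tile larger than image
--     if tile_width > image_width or tile_height > image_height:
--         return [], {'rows': 0, 'cols': 0, 'total_tiles': 0}
--
--     # Edge case: invalid dimensions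
--     if tile_width <= 0 or tile_height <= 0:
--         return [], {'rows': 0, 'cols': 0, 'total_tiles': 0}
--
--     cols = 0
--     rows = 0
--
--     current_x = 0
--     while current_x + tile_width <= image_width:
--         cols += 1
--         current_y = 0
--         row_count = 0
--
--         while current_y + tile_height <= image_height:
--             tiles.append((current_x, current_y, tile_width, tile_height))
--             current_y += tile_height + divider_width
--             row_count += 1
--
--         # Track rows from first column
--         if rows == 0:
--             rows = row_count
--
--         current_x += tile_width + divider_width
--
--     metadata = {
--         'rows': rows,
--         'cols': cols,
--         'total_tiles': len(tiles)
--     }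
--
--     return tiles, metadata
-- ===== SOURCE B (Python) =====
-- def calculate_tile_regions(
--     image_width,
--     image_height,
--     tile_width,
--     tile_height,
--     divider_width=0,
-- ):
--     if tile_width > image_width or tile_height > image_height:
--         return [], {'rows': 0, 'cols': 0, 'total_tiles': 0}
--     if tile_width <= 0 or tile_height <= 0:
--         return [], {'rows': 0, 'cols': 0, 'total_tiles': 0}
--
--     step_x = tile_width + divider_width
--     step_y = tile_height + divider_width
--     cols = (image_width - tile_width) // step_x + 1
--     rows = (image_height - tile_height) // step_y + 1
--
--     tiles = [
--         (col * step_x, row * step_y, tile_width, tile_height)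
--         for col in range(cols)
--         for row in range(rows)
--     ]
--     return tiles, {'rows': rows, 'cols': cols, 'total_tiles': rows * cols}
-- ===== Notes on version B (the rewrite author's own statement) =====
-- stated objective: simpler
-- what changed: Replaced the incremental while-loop position stepping and per-column row counting with closed-form integer counts (cols/rows via floor division) and a single comprehension over range(cols) x range(rows) using multiplicative addressing.
import Mathlib
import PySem

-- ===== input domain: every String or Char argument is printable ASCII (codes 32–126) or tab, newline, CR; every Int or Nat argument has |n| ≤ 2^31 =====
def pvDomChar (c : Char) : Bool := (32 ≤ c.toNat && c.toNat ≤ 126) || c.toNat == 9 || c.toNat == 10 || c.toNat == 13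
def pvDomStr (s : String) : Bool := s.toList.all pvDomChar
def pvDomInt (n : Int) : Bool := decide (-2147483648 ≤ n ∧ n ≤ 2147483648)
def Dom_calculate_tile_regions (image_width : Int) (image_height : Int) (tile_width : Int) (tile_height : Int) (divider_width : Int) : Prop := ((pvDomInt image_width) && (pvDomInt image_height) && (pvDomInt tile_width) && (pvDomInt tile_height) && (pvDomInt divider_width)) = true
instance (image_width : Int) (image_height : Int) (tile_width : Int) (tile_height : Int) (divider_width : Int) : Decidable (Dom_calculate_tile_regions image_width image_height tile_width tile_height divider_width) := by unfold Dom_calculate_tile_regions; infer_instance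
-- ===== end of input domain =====

-- B replaces A's incremental while-loop stepping and per-column row counting by
-- closed-form floor-division counts and a range×range comprehension (objective: simpler).

-- ===== PORT A =====
-- inner 'while current_y + tile_height <= image_height' loop: returns (tiles of this
-- column, row_count).  The fuel only makes the recursion total; Pre_ guarantees it is
-- never exhausted on admitted inputs.
def loopYA (ih tw th dw x : Int) : Nat → Int → (List (Int × Int × Int × Int)) × Int
  | 0, _ => ([], 0)
  | fuel+1, y =>
    if y + th ≤ ih then
      let p := loopYA ih tw th dw x fuel (y + (th + dw))
      ((x, y, tw, th) :: p.1, p.2 + 1)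
    else ([], 0)

-- outer 'while current_x + tile_width <= image_width' loop, carrying cols and rows
def loopXA (iw ih tw th dw : Int) : Nat → Int → Int → Int → (List (Int × Int × Int × Int)) × Int × Int
  | 0, _, cols, rows => ([], cols, rows)
  | fuel+1, x, cols, rows =>
    if x + tw ≤ iw then
      let q := loopYA ih tw th dw x ((ih - th).toNat + 1) 0
      let rows' := if rows = 0 then q.2 else rows
      let r := loopXA iw ih tw th dw fuel (x + (tw + dw)) (cols + 1) rows'
      (q.1 ++ r.1, r.2)
    else ([], cols, rows)

def calculate_tile_regions (image_width : Int) (image_height : Int) (tile_width : Int) (tile_height : Int) (divider_width : Int) : (List (Int × Int × Int × Int)) × (List (String × Int)) :=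
  if tile_width > image_width ∨ tile_height > image_height then
    ([], [("rows", 0), ("cols", 0), ("total_tiles", 0)])
  else if tile_width ≤ 0 ∨ tile_height ≤ 0 then
    ([], [("rows", 0), ("cols", 0), ("total_tiles", 0)])
  else
    let r := loopXA image_width image_height tile_width tile_height divider_width
      ((image_width - tile_width).toNat + 1) 0 0 0
    (r.1, [("rows", r.2.2), ("cols", r.2.1), ("total_tiles", (r.1.length : Int))])

-- ===== PORT B =====
def calculate_tile_regions_alt (image_width : Int) (image_height : Int) (tile_width : Int) (tile_height : Int) (divider_width : Int) : (List (Int × Int × Int × Int)) × (List (String × Int)) :=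
  if tile_width > image_width ∨ tile_height > image_height then
    ([], [("rows", 0), ("cols", 0), ("total_tiles", 0)])
  else if tile_width ≤ 0 ∨ tile_height ≤ 0 then
    ([], [("rows", 0), ("cols", 0), ("total_tiles", 0)])
  else
    let step_x := tile_width + divider_width
    let step_y := tile_height + divider_width
    let cols := PySem.Int.floordiv (image_width - tile_width) step_x + 1
    let rows := PySem.Int.floordiv (image_height - tile_height) step_y + 1
    let tiles := (PySem.List.pyRange 0 cols 1).flatMap (fun col =>
      (PySem.List.pyRange 0 rows 1).map (fun row =>
        (col * step_x, row * step_y, tile_width, tile_height)))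
    (tiles, [("rows", rows), ("cols", cols), ("total_tiles", rows * cols)])

-- ===== PRECONDITION & SPEC =====
-- Pre_ excludes exactly the inputs on which A never returns (both edge-case guards
-- fail and a non-positive step makes a while loop infinite); A returns on all others.
def Pre_calculate_tile_regions (image_width : Int) (image_height : Int) (tile_width : Int) (tile_height : Int) (divider_width : Int) : Prop :=
  tile_width > image_width ∨ tile_height > image_height ∨ tile_width ≤ 0 ∨ tile_height ≤ 0 ∨
    (0 < tile_width + divider_width ∧ 0 < tile_height + divider_width)
instance (image_width : Int) (image_height : Int) (tile_width : Int) (tile_height : Int) (divider_width : Int) : Decidable (Pre_calculate_tile_regions image_width image_height tile_width tile_height divider_width) := by unfold Pre_calculate_tile_regions; infer_instance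

def pvWitness_calculate_tile_regions : Int × Int × Int × Int × Int := (10, 10, 3, 3, 1)

def Spec_calculate_tile_regions (image_width : Int) (image_height : Int) (tile_width : Int) (tile_height : Int) (divider_width : Int) (out : (List (Int × Int × Int × Int)) × (List (String × Int))) : Prop := out = calculate_tile_regions_alt image_width image_height tile_width tile_height divider_width
instance (image_width : Int) (image_height : Int) (tile_width : Int) (tile_height : Int) (divider_width : Int) (out : (List (Int × Int × Int × Int)) × (List (String × Int))) : Decidable (Spec_calculate_tile_regions image_width image_height tile_width tile_height divider_width out) := by unfold Spec_calculate_tile_regions; infer_instance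

-- ===== CLAIM (what is proved, stated in full; the proofs are below) =====
def Claim_equal_calculate_tile_regions : Prop := ∀ (image_width : Int) (image_height : Int) (tile_width : Int) (tile_height : Int) (divider_width : Int), Dom_calculate_tile_regions image_width image_height tile_width tile_height divider_width → Pre_calculate_tile_regions image_width image_height tile_width tile_height divider_width → Spec_calculate_tile_regions image_width image_height tile_width tile_height divider_width (calculate_tile_regions image_width image_height tile_width tile_height divider_width)

-- ===== LEMMAS AND PROOFS =====

-- inner loop computes exactly m tiles when m is the iteration count and fuel suffices
lemma loopYA_spec (ih tw th dw x : Int) (s : Int) (hs : s = th + dw) :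
    ∀ (m fuel : Nat) (y : Int), m ≤ fuel →
    (∀ k : Nat, k < m → y + k * s + th ≤ ih) → (ih < y + m * s + th) →
    loopYA ih tw th dw x fuel y
      = ((List.range m).map (fun k : Nat => (x, y + (k : Int) * s, tw, th)), (m : Int)) := by
  subst hs
  intro m
  induction m with
  | zero =>
    intro fuel y _ _ hstop
    cases fuel with
    | zero => simp [loopYA]
    | succ f =>
      simp only [Nat.cast_zero, zero_mul, add_zero] at hstop
      simp only [loopYA]
      rw [if_neg (show ¬ (y + th ≤ ih) by omega)]
      simp
  | succ m ih2 =>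
    intro fuel y hfuel hlt hstop
    cases fuel with
    | zero => omega
    | succ f =>
      have h0 : y + th ≤ ih := by
        have := hlt 0 (by omega); simpa using this
      have hrec := ih2 f (y + (th + dw)) (by omega)
        (fun k hk => by
          have := hlt (k + 1) (by omega)
          push_cast at this ⊢
          linarith [this])
        (by
          push_cast at hstop ⊢
          linarith [hstop])
      simp only [loopYA, if_pos h0, hrec]
      simp only [Prod.mk.injEq]
      refine ⟨?_, by push_cast; ring⟩
      rw [List.range_succ_eq_map]
      simp only [List.map_cons, List.map_map]
      rw [List.cons_eq_cons]
      refine ⟨by simp, ?_⟩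
      apply List.map_congr_left
      intro k _
      simp only [Function.comp]
      push_cast
      ring_nf

-- number of rows (iterations of the inner loop starting at 0) and its bracketing
lemma count_bracket (total step : Int) (h0 : 0 ≤ total) (hstep : 0 < step) :
    (∀ k : Nat, k < (total / step).toNat + 1 → (k : Int) * step ≤ total) ∧
    total < (((total / step).toNat + 1 : Nat) : Int) * step := by
  have hq : 0 ≤ total / step := Int.ediv_nonneg h0 (le_of_lt hstep)
  have hdm := Int.mul_ediv_add_emod total step
  have hr0 : 0 ≤ total % step := Int.emod_nonneg total (by omega)
  have hrs : total % step < step := Int.emod_lt_of_pos total hstep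
  constructor
  · intro k hk
    have hk' : (k : Int) ≤ total / step := by
      have : (k : Nat) ≤ (total / step).toNat := by omega
      omega
    calc (k : Int) * step ≤ (total / step) * step :=
          mul_le_mul_of_nonneg_right hk' (le_of_lt hstep)
      _ = step * (total / step) := by ring
      _ ≤ total := by omega
  · have : (((total / step).toNat + 1 : Nat) : Int) = total / step + 1 := by
      push_cast; omega
    rw [this]
    have : (total / step + 1) * step = step * (total / step) + step := by ring
    omega

-- outer loop, under positive steps and passed guards, is the flatMap of columns
lemma loopXA_spec (iw ih tw th dw : Int)
    (hih : th ≤ ih) (hsy : 0 < th + dw) :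
    ∀ (m fuel : Nat) (x cols rows : Int), m ≤ fuel →
    (∀ k : Nat, k < m → x + k * (tw + dw) + tw ≤ iw) → (iw < x + m * (tw + dw) + tw) →
    loopXA iw ih tw th dw fuel x cols rows
      = ((List.range m).flatMap (fun c : Nat =>
            (List.range (((ih - th) / (th + dw)).toNat + 1)).map
              (fun k : Nat => (x + (c : Int) * (tw + dw), (k : Int) * (th + dw), tw, th))),
         cols + m,
         if m = 0 then rows
         else if rows = 0 then ((((ih - th) / (th + dw)).toNat + 1 : Nat) : Int) else rows) := by
  intro m
  induction m with
  | zero =>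
    intro fuel x cols rows _ _ hstop
    cases fuel with
    | zero => simp [loopXA]
    | succ f =>
      simp only [Nat.cast_zero, zero_mul, add_zero] at hstop
      simp only [loopXA]
      rw [if_neg (show ¬ (x + tw ≤ iw) by omega)]
      simp
  | succ m ih2 =>
    intro fuel x cols rows hfuel hlt hstop
    cases fuel with
    | zero => omega
    | succ f =>
      have h0 : x + tw ≤ iw := by
        have := hlt 0 (by omega); simpa using this
    -- inner loop evaluation
      have hbr := count_bracket (ih - th) (th + dw) (by omega) hsy
      set nr : Nat := ((ih - th) / (th + dw)).toNat + 1 with hnr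
      have hy := loopYA_spec ih tw th dw x (th + dw) rfl nr ((ih - th).toNat + 1) 0
        (by
          have : ((ih - th) / (th + dw)) ≤ ih - th := Int.ediv_le_self _ (by omega)
          omega)
        (fun k hk => by have := hbr.1 k hk; omega)
        (by have := hbr.2; omega)
      have hrec := ih2 f (x + (tw + dw)) (cols + 1)
        (if rows = 0 then ((nr : Nat) : Int) else rows) (by omega)
        (fun k hk => by
          have := hlt (k + 1) (by omega)
          push_cast at this ⊢
          linarith [this])
        (by
          push_cast at hstop ⊢
          linarith [hstop])
      simp only [loopXA, if_pos h0, hy, hrec]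
      simp only [Prod.mk.injEq]
      refine ⟨?_, by push_cast; ring, ?_⟩
      · rw [List.range_succ_eq_map (n := m)]
        simp only [List.flatMap_cons, List.flatMap_map]
        congr 1
        · apply List.map_congr_left
          intro k _
          simp
        · apply List.flatMap_congr
          intro c _
          apply List.map_congr_left
          intro k _
          simp only [Prod.mk.injEq]
          push_cast
          exact ⟨by ring, trivial⟩
      · by_cases hrw : rows = 0
        · subst hrw
          have : ((nr : Nat) : Int) ≠ 0 := by positivity
          split <;> simp_all
        · simp only [if_neg hrw]
          split <;> simp

-- length of a flatMap whose pieces all have length n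
lemma flatMap_const_length {α β : Type} (l : List α) (g : α → List β) (n : Nat)
    (h : ∀ a ∈ l, (g a).length = n) : (l.flatMap g).length = l.length * n := by
  induction l with
  | nil => simp
  | cons x xs ih =>
    simp only [List.flatMap_cons, List.length_append, List.length_cons]
    rw [h x (by simp), ih (fun a ha => h a (by simp [ha]))]
    ring

-- ===== VERDICT (by name: the statement is the Claim_ definition above) =====
theorem calculate_tile_regions_spec : Claim_equal_calculate_tile_regions := by
  intro iw ih tw th dw _ hpre
  unfold Spec_calculate_tile_regions calculate_tile_regions calculate_tile_regions_alt
  by_cases hg1 : tw > iw ∨ th > ih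
  · simp [hg1]
  by_cases hg2 : tw ≤ 0 ∨ th ≤ 0
  · simp [hg1, hg2]
  simp only [if_neg hg1, if_neg hg2]
  rw [not_or] at hg1 hg2
  have hiw : tw ≤ iw := by omega
  have hih : th ≤ ih := by omega
  have htw : 0 < tw := by omega
  have hth : 0 < th := by omega
  have hsx : 0 < tw + dw := by
    rcases hpre with h | h | h | h | h <;> omega
  have hsy : 0 < th + dw := by
    rcases hpre with h | h | h | h | h <;> omega
  -- closed-form column count
  have hbrx := count_bracket (iw - tw) (tw + dw) (by omega) hsx
  set nc : Nat := ((iw - tw) / (tw + dw)).toNat + 1 with hnc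
  set nr : Nat := ((ih - th) / (th + dw)).toNat + 1 with hnr
  have hx := loopXA_spec iw ih tw th dw hih hsy
    nc ((iw - tw).toNat + 1) 0 0 0
    (by
      have : ((iw - tw) / (tw + dw)) ≤ iw - tw := Int.ediv_le_self _ (by omega)
      omega)
    (fun k hk => by have := hbrx.1 k hk; omega)
    (by have := hbrx.2; omega)
  simp only [hx]
  -- B's closed forms
  have hfx : PySem.Int.floordiv (iw - tw) (tw + dw) = (iw - tw) / (tw + dw) :=
    PySem.Int.floordiv_eq_ediv_of_pos hsx
  have hfy : PySem.Int.floordiv (ih - th) (th + dw) = (ih - th) / (th + dw) :=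
    PySem.Int.floordiv_eq_ediv_of_pos hsy
  have hcn : PySem.Int.floordiv (iw - tw) (tw + dw) + 1 = ((nc : Nat) : Int) := by
    rw [hfx]; push_cast [hnc]
    have : 0 ≤ (iw - tw) / (tw + dw) := Int.ediv_nonneg (by omega) (by omega)
    omega
  have hrn : PySem.Int.floordiv (ih - th) (th + dw) + 1 = ((nr : Nat) : Int) := by
    rw [hfy]; push_cast [hnr]
    have : 0 ≤ (ih - th) / (th + dw) := Int.ediv_nonneg (by omega) (by omega)
    omega
  simp only [hcn, hrn, PySem.List.pyRange_zero_nat]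
  refine Prod.ext ?_ ?_
  · simp only [zero_add]
    simp only [List.flatMap_map, List.map_map]
    rfl
  · have hlen :
        ((List.range nc).flatMap (fun c : Nat =>
            (List.range (((ih - th) / (th + dw)).toNat + 1)).map
              (fun k : Nat => ((0 : Int) + (c : Int) * (tw + dw), (k : Int) * (th + dw), tw, th)))).length
          = nc * nr := by
      rw [flatMap_const_length _ _ nr (fun a _ => by simp [hnr])]
      simp
    have hne : nc ≠ 0 := by omega
    simp only [hlen]
    simp [hne]
    have h0q : 0 ≤ (ih - th) / (th + dw) := Int.ediv_nonneg (by omega) (by omega)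
    refine ⟨by omega, by ring⟩
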